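-- pv_equiv track=rewrite | github.com/Xiyuejiushikaixindeyisi/block-prefix-analyzer | src/block_prefix_analyzer/v2/diagnostics.py | diff_token_ids
-- ===== SOURCE A (Python) =====
-- def diff_token_ids(
--     expected: list[int],
--     actual: list[int],
--     label: str = "token_ids",
--     context: int = 3,
-- ) -> str:
--     """Summarise mismatches between two token ID sequences.
--
--     Reports:
--     - Whether lengths differ
--     - Up to ``context`` mismatched positions (index, expected_id, actual_id)
--     - The first mismatch index
--     """
--     if expected == actual:
--         return f"[{label}] OK — {len(actual)} token IDs match exactly"
--
--     lines = [
--         f"[{label}] MISMATCH — expected {len(expected)} tokens, got {len(actual)} tokens"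
--     ]
--     mismatches: list[tuple[int, int | str, int | str]] = []
--     max_len = max(len(expected), len(actual))
--     for i in range(max_len):
--         exp_tok = expected[i] if i < len(expected) else "<missing>"
--         act_tok = actual[i] if i < len(actual) else "<missing>"
--         if exp_tok != act_tok:
--             mismatches.append((i, exp_tok, act_tok))
--         if len(mismatches) >= context:
--             break
--
--     for pos, exp_t, act_t in mismatches:
--         lines.append(f"  pos {pos:4d}: expected {exp_t!r:>8}  actual {act_t!r:>8}")
--
--     total_mismatches = sum(
--         1 for i in range(max_len)
--         if (expected[i] if i < len(expected) else None) != (actual[i] if i < len(actual) else None)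
--     )
--     if total_mismatches > context:
--         lines.append(f"  ... and {total_mismatches - context} more mismatches (showing first {context})")
--     return "\n".join(lines)
-- ===== SOURCE B (Python) =====
-- def diff_token_ids(
--     expected: list[int],
--     actual: list[int],
--     label: str = "token_ids",
--     context: int = 3,
-- ) -> str:
--     """Single-pass rewrite: one loop maintains the total mismatch count and
--     the displayed lines together (a stop flag freezes the display, checked
--     after the possible append, matching the original's break placement)."""
--     if expected == actual:
--         return f"[{label}] OK — {len(actual)} token IDs match exactly"
--
--     max_len = max(len(expected), len(actual))
--     total = 0
--     shown = []
--     stopped = False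
--     for i in range(max_len):
--         exp_tok = expected[i] if i < len(expected) else "<missing>"
--         act_tok = actual[i] if i < len(actual) else "<missing>"
--         if exp_tok != act_tok:
--             total += 1
--             if not stopped:
--                 shown.append(f"  pos {i:4d}: expected {exp_tok!r:>8}  actual {act_tok!r:>8}")
--         if not stopped and len(shown) >= context:
--             stopped = True
--
--     lines = [
--         f"[{label}] MISMATCH — expected {len(expected)} tokens, got {len(actual)} tokens"
--     ]
--     lines.extend(shown)
--     if total > context:
--         lines.append(f"  ... and {total - context} more mismatches (showing first {context})")
--     return "\n".join(lines)
-- ===== Notes on version B (the rewrite author's own statement) =====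
-- stated objective: alternative
-- what changed: Replaced A's two passes (a display loop that breaks once `context` mismatches are collected, plus a separate full recount of all mismatches) with a single loop over range(max_len) that maintains the running total and the display lines together, freezing the display with a stop flag checked after the possible append so the break placement is matched exactly.
import Mathlib
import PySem

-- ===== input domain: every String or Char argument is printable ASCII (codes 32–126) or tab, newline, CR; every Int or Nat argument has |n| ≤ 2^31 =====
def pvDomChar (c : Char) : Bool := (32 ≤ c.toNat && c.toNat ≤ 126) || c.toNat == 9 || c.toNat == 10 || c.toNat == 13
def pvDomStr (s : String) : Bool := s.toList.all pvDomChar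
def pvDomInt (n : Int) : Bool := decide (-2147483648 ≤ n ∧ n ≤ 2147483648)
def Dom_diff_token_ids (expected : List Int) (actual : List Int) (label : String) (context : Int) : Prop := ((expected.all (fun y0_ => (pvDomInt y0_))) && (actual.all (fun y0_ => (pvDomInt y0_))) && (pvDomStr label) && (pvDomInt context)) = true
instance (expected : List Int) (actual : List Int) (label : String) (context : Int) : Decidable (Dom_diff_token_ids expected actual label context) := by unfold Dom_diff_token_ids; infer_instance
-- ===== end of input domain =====

-- ===== PORT A =====
-- B fuses A's display-loop-with-break and its separate full recount pass into one loop; same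
-- output everywhere (objective: alternative decomposition, not speed).

-- shared formatting helpers (both Pythons build the same f-strings)
def pyReprTok : Option Int → String
  | some n => PySem.Int.toStr n          -- repr(int) = str(int)
  | none => "'<missing>'"                -- repr("<missing>")

-- Python's {x:>w} / {x:wd}: right-justify with spaces to width w (exact here: no sign/fill options)
def padL (w : Nat) (s : String) : String :=
  String.ofList (List.replicate (w - s.toList.length) ' ' ++ s.toList)

def fmtLine (i : Nat) (exp act : Option Int) : String :=
  "  pos " ++ padL 4 (PySem.Int.toStr (i : Int)) ++ ": expected " ++ padL 8 (pyReprTok exp)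
    ++ "  actual " ++ padL 8 (pyReprTok act)

def headerLine (label : String) (elen alen : Nat) : String :=
  "[" ++ label ++ "] MISMATCH — expected " ++ PySem.Int.toStr (elen : Int)
    ++ " tokens, got " ++ PySem.Int.toStr (alen : Int) ++ " tokens"

-- A's first loop: 'for i in range(max_len): … if len(mismatches) >= context: break'
def aCollect (e a : List Int) (ctx : Int) : List Nat → List (Nat × Option Int × Option Int) →
    List (Nat × Option Int × Option Int)
  | [], acc => acc
  | i :: rest, acc =>
    let exp := e[i]?                     -- expected[i] if i < len(expected) else "<missing>"
    let act := a[i]?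
    let acc' := if exp ≠ act then acc ++ [(i, exp, act)] else acc
    if ctx ≤ (acc'.length : Int) then acc' else aCollect e a ctx rest acc'

def diff_token_ids (expected : List Int) (actual : List Int) (label : String) (context : Int) : String :=
  if expected = actual then
    "[" ++ label ++ "] OK — " ++ PySem.Int.toStr (actual.length : Int) ++ " token IDs match exactly"
  else
    let maxLen := max expected.length actual.length
    let mismatches := aCollect expected actual context (List.range maxLen) []
    let lines := headerLine label expected.length actual.length ::
      mismatches.map (fun p => fmtLine p.1 p.2.1 p.2.2)
    -- A's second pass: sum(1 for i in range(max_len) if …); the None sentinel behaves like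
    -- Option's none here (a present id never equals a missing one, both missing cannot occur)
    let total := (List.range maxLen).foldl
      (fun s i => if expected[i]? ≠ actual[i]? then s + 1 else s) (0 : Int)
    let lines := if total > context then
        lines ++ ["  ... and " ++ PySem.Int.toStr (total - context)
          ++ " more mismatches (showing first " ++ PySem.Int.toStr context ++ ")"]
      else lines
    PySem.Str.join "\n" lines

-- ===== PORT B =====
-- one iteration of B's fused loop over state (total, shown, stopped)
def bStep (e a : List Int) (ctx : Int) (st : Int × List String × Bool) (i : Nat) :
    Int × List String × Bool :=
  match st with
  | (total, shown, stopped) =>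
    let exp := e[i]?
    let act := a[i]?
    let total := if exp ≠ act then total + 1 else total
    let shown := if exp ≠ act ∧ stopped = false then shown ++ [fmtLine i exp act] else shown
    let stopped := if stopped = false ∧ ctx ≤ (shown.length : Int) then true else stopped
    (total, shown, stopped)

def diff_token_ids_alt (expected : List Int) (actual : List Int) (label : String) (context : Int) : String :=
  if expected = actual then
    "[" ++ label ++ "] OK — " ++ PySem.Int.toStr (actual.length : Int) ++ " token IDs match exactly"
  else
    let maxLen := max expected.length actual.length
    let res := (List.range maxLen).foldl (bStep expected actual context) ((0 : Int), [], false)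
    let lines := headerLine label expected.length actual.length :: res.2.1
    let lines := if res.1 > context then
        lines ++ ["  ... and " ++ PySem.Int.toStr (res.1 - context)
          ++ " more mismatches (showing first " ++ PySem.Int.toStr context ++ ")"]
      else lines
    PySem.Str.join "\n" lines

-- ===== PRECONDITION & SPEC =====
def Spec_diff_token_ids (expected : List Int) (actual : List Int) (label : String) (context : Int) (out : String) : Prop := out = diff_token_ids_alt expected actual label context
instance (expected : List Int) (actual : List Int) (label : String) (context : Int) (out : String) : Decidable (Spec_diff_token_ids expected actual label context out) := by unfold Spec_diff_token_ids; infer_instance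

-- ===== CLAIM (what is proved, stated in full; the proofs are below) =====
def Claim_equal_diff_token_ids : Prop := ∀ (expected : List Int) (actual : List Int) (label : String) (context : Int), Dom_diff_token_ids expected actual label context → Spec_diff_token_ids expected actual label context (diff_token_ids expected actual label context)

-- ===== LEMMAS AND PROOFS =====

def cnt (e a : List Int) (l : List Nat) : Int :=
  l.foldl (fun s i => if e[i]? ≠ a[i]? then s + 1 else s) 0

theorem cnt_shift (e a : List Int) (l : List Nat) (t : Int) :
    l.foldl (fun s i => if e[i]? ≠ a[i]? then s + 1 else s) t = t + cnt e a l := by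
  induction l generalizing t with
  | nil => simp [cnt]
  | cons i rest ih =>
    simp only [cnt, List.foldl_cons]
    rw [ih, ih]
    split_ifs <;> ring

theorem cnt_cons (e a : List Int) (i : Nat) (rest : List Nat) :
    cnt e a (i :: rest) = (if e[i]? ≠ a[i]? then 1 else 0) + cnt e a rest := by
  have h : cnt e a (i :: rest) = List.foldl (fun s j => if e[j]? ≠ a[j]? then s + 1 else s)
      (if e[i]? ≠ a[i]? then (0:Int) + 1 else 0) rest := rfl
  rw [h, cnt_shift]
  generalize cnt e a rest = C
  split_ifs <;> omega

theorem bStep_stopped (e a : List Int) (ctx : Int) (t : Int) (sh : List String) (i : Nat) :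
    bStep e a ctx (t, sh, true) i = ((if e[i]? ≠ a[i]? then t + 1 else t), sh, true) := by
  simp [bStep]

theorem bfold_stopped (e a : List Int) (ctx : Int) (l : List Nat) (t : Int) (sh : List String) :
    l.foldl (bStep e a ctx) (t, sh, true) = (t + cnt e a l, sh, true) := by
  induction l generalizing t with
  | nil => simp [cnt]
  | cons i rest ih =>
    rw [List.foldl_cons, bStep_stopped, ih, cnt_cons]
    have : ∀ x y : Int, ((if e[i]? ≠ a[i]? then t + 1 else t) + x = t + ((if e[i]? ≠ a[i]? then 1 else 0) + x)) := by
      intro x y; split_ifs <;> omega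
    rw [Prod.mk.injEq, Prod.mk.injEq]
    exact ⟨this _ 0, rfl, rfl⟩

theorem bStep_live (e a : List Int) (ctx : Int) (t : Int) (sh : List String) (i : Nat) :
    bStep e a ctx (t, sh, false) i =
      ((if e[i]? ≠ a[i]? then t + 1 else t),
       (if e[i]? ≠ a[i]? then sh ++ [fmtLine i e[i]? a[i]?] else sh),
       decide (ctx ≤ (((if e[i]? ≠ a[i]? then sh ++ [fmtLine i e[i]? a[i]?] else sh)).length : Int))) := by
  by_cases hm : e[i]? = a[i]? <;> simp [bStep, hm]

theorem bfold_main (e a : List Int) (ctx : Int) (l : List Nat) (t : Int)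
    (macc : List (Nat × Option Int × Option Int)) :
    (l.foldl (bStep e a ctx) (t, macc.map (fun p => fmtLine p.1 p.2.1 p.2.2), false)).1 =
        t + cnt e a l ∧
    (l.foldl (bStep e a ctx) (t, macc.map (fun p => fmtLine p.1 p.2.1 p.2.2), false)).2.1 =
        (aCollect e a ctx l macc).map (fun p => fmtLine p.1 p.2.1 p.2.2) := by
  induction l generalizing t macc with
  | nil => simp [aCollect, cnt]
  | cons i rest ih =>
    rw [List.foldl_cons, bStep_live]
    by_cases hm : e[i]? = a[i]?
    · -- match at i
      simp only [hm, ne_eq, not_true_eq_false, if_false, List.length_map]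
      by_cases hb : ctx ≤ ((macc.length : Nat) : Int)
      · simp only [hb, decide_true]
        rw [bfold_stopped]
        have hA : aCollect e a ctx (i :: rest) macc = macc := by
          simp only [aCollect, if_neg (show ¬(e[i]? ≠ a[i]?) by simp [hm])]
          rw [if_pos hb]
        rw [hA, cnt_cons]
        simp [hm]
      · simp only [hb, decide_false]
        have hA : aCollect e a ctx (i :: rest) macc = aCollect e a ctx rest macc := by
          simp only [aCollect, if_neg (show ¬(e[i]? ≠ a[i]?) by simp [hm])]
          rw [if_neg hb]
        rw [hA, cnt_cons]
        have h2 := ih t macc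
        refine ⟨?_, h2.2⟩
        rw [h2.1]; simp [hm]
    · -- mismatch at i
      simp only [ne_eq, hm, not_false_eq_true, if_true]
      have hcons : List.map (fun p => fmtLine p.1 p.2.1 p.2.2) macc ++ [fmtLine i e[i]? a[i]?] =
          List.map (fun p => fmtLine p.1 p.2.1 p.2.2) (macc ++ [(i, e[i]?, a[i]?)]) := by
        simp
      rw [hcons]
      have hlen : ((List.map (fun p => fmtLine p.1 p.2.1 p.2.2) (macc ++ [(i, e[i]?, a[i]?)])).length : Int)
          = ((macc ++ [(i, e[i]?, a[i]?)]).length : Int) := by simp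
      rw [hlen]
      by_cases hb : ctx ≤ (((macc ++ [(i, e[i]?, a[i]?)]).length : Nat) : Int)
      · simp only [hb, decide_true]
        rw [bfold_stopped]
        have hA : aCollect e a ctx (i :: rest) macc = macc ++ [(i, e[i]?, a[i]?)] := by
          simp only [aCollect, if_pos (show e[i]? ≠ a[i]? from hm)]
          rw [if_pos hb]
        rw [hA, cnt_cons]
        refine ⟨?_, rfl⟩
        simp only [if_pos (show e[i]? ≠ a[i]? from hm)]
        ring
      · simp only [hb, decide_false]
        have hA : aCollect e a ctx (i :: rest) macc =
            aCollect e a ctx rest (macc ++ [(i, e[i]?, a[i]?)]) := by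
          simp only [aCollect, if_pos (show e[i]? ≠ a[i]? from hm)]
          rw [if_neg hb]
        rw [hA, cnt_cons]
        have h2 := ih (t + 1) (macc ++ [(i, e[i]?, a[i]?)])
        refine ⟨?_, h2.2⟩
        rw [h2.1]
        simp only [if_pos (show e[i]? ≠ a[i]? from hm)]
        ring

-- ===== VERDICT (by name: the statement is the Claim_ definition above) =====
theorem diff_token_ids_spec : Claim_equal_diff_token_ids := by
  intro expected actual label context _
  unfold Spec_diff_token_ids diff_token_ids diff_token_ids_alt
  by_cases heq : expected = actual
  · simp [heq]
  · simp only [if_neg heq]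
    have h := bfold_main expected actual context
      (List.range (max expected.length actual.length)) 0 []
    simp only [List.map_nil, zero_add] at h
    rw [h.1, h.2]
    rfl
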